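-- pv_equiv track=rewrite | github.com/arnab19111987-ops/Firstry | src/firsttry/reporting.py | format_cache_summary
-- ===== SOURCE A (Python) =====
-- from typing import List, Dict, Any
--
-- def normalize_cache_state(tool_result: Dict[str, Any]) -> Dict[str, Any]:
--     """
--     Normalize cache state for honest reporting.
--
--     tool_result {
--       "name": ...,
--       "status": "ok" | "fail" | "skipped",
--       "cache_state": "hit" | "miss" | "re-run-failed" | None,
--       ...
--     }
--     """
--     cache_state = tool_result.get("cache_state")
--
--     if cache_state == "re-run-failed":
--         # count as structural hit - cache worked, we just re-ran due to policy
--         tool_result["cache_bucket"] = "hit-policy"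
--     elif cache_state == "hit":
--         tool_result["cache_bucket"] = "hit"
--     else:
--         tool_result["cache_bucket"] = "miss"
--
--     return tool_result
--
-- def format_cache_summary(results: List[Dict[str, Any]]) -> str:
--     """Format cache statistics with honest hit rate reporting."""
--     normalized = [normalize_cache_state(r) for r in results]
--
--     hits = len([r for r in normalized if r.get("cache_bucket") == "hit"])
--     policy_reruns = len([r for r in normalized if r.get("cache_bucket") == "hit-policy"])
--     misses = len([r for r in normalized if r.get("cache_bucket") == "miss"])
--
--     total = hits + policy_reruns + misses
--     if total == 0:
--         return "Cache: No cached operations"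
--
--     structural_hits = hits + policy_reruns
--
--     summary_parts: List[str] = []
--     if structural_hits > 0:
--         summary_parts.append(f"Cache (structural): {structural_hits}/{total}")
--     if policy_reruns > 0:
--         summary_parts.append(f"Cache (policy-respected): {policy_reruns} re-run (failed tools)")
--     if misses > 0:
--         summary_parts.append(f"Cache misses: {misses}")
--
--     return "  ".join(summary_parts)
-- ===== SOURCE B (Python) =====
-- def format_cache_summary(results):
--     """Single pass: classify each result, tag it, and count the three buckets."""
--     hits = 0
--     policy_reruns = 0
--     misses = 0
--     for r in results:
--         cs = r.get("cache_state")
--         if cs == "re-run-failed":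
--             r["cache_bucket"] = "hit-policy"
--             policy_reruns += 1
--         elif cs == "hit":
--             r["cache_bucket"] = "hit"
--             hits += 1
--         else:
--             r["cache_bucket"] = "miss"
--             misses += 1
--     total = hits + policy_reruns + misses
--     if total == 0:
--         return "Cache: No cached operations"
--     structural_hits = hits + policy_reruns
--     summary_parts = []
--     if structural_hits > 0:
--         summary_parts.append(f"Cache (structural): {structural_hits}/{total}")
--     if policy_reruns > 0:
--         summary_parts.append(f"Cache (policy-respected): {policy_reruns} re-run (failed tools)")
--     if misses > 0:
--         summary_parts.append(f"Cache misses: {misses}")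
--     return "  ".join(summary_parts)
-- ===== Notes on version B (the rewrite author's own statement) =====
-- stated objective: simpler
-- what changed: Replaces the normalized intermediate list plus three separate filtering passes with one loop over results that classifies each dict once and maintains three counters (the cache_bucket mutation is preserved).
import Mathlib
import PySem

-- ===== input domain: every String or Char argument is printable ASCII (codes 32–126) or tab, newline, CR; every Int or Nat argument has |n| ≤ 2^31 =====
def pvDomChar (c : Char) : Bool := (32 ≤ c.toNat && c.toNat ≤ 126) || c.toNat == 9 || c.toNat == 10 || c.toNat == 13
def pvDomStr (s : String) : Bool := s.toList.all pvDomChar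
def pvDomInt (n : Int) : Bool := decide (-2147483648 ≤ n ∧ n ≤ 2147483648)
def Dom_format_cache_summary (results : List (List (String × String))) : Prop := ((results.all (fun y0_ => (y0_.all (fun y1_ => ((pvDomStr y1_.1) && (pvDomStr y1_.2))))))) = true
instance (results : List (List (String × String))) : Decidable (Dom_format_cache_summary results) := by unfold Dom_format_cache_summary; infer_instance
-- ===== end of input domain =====

-- NOTE: the Python A (and B) also mutate each input dict (r["cache_bucket"] = …); the
-- equivalence proved here is about the RETURN value only (both Pythons perform the same mutation).

-- dict.get(k) on an association list: first match (shared builtin used by both Pythons)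
def pvGet (r : List (String × String)) (k : String) : Option String :=
  (r.find? (fun p => p.1 == k)).map Prod.snd

-- d[k] = v on an association list: overwrite the first occurrence, else append (shared builtin)
def pvSet (r : List (String × String)) (k v : String) : List (String × String) :=
  match r with
  | [] => [(k, v)]
  | p :: rest => if p.1 == k then (k, v) :: rest else p :: pvSet rest k v

-- ===== PORT A =====
def normalize_cache_state (tool_result : List (String × String)) : List (String × String) :=
  let cache_state := pvGet tool_result "cache_state"
  if cache_state == some "re-run-failed" then
    pvSet tool_result "cache_bucket" "hit-policy"
  else if cache_state == some "hit" then
    pvSet tool_result "cache_bucket" "hit"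
  else
    pvSet tool_result "cache_bucket" "miss"

def format_cache_summary (results : List (List (String × String))) : String :=
  let normalized := results.map normalize_cache_state
  let hits : Int := (normalized.filter (fun r => pvGet r "cache_bucket" == some "hit")).length
  let policy_reruns : Int := (normalized.filter (fun r => pvGet r "cache_bucket" == some "hit-policy")).length
  let misses : Int := (normalized.filter (fun r => pvGet r "cache_bucket" == some "miss")).length
  let total := hits + policy_reruns + misses
  if total == 0 then "Cache: No cached operations"
  else
    let structural_hits := hits + policy_reruns
    let summary_parts : List String := []
    let summary_parts := if structural_hits > 0 then
      summary_parts ++ ["Cache (structural): " ++ PySem.Int.toStr structural_hits ++ "/" ++ PySem.Int.toStr total] else summary_parts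
    let summary_parts := if policy_reruns > 0 then
      summary_parts ++ ["Cache (policy-respected): " ++ PySem.Int.toStr policy_reruns ++ " re-run (failed tools)"] else summary_parts
    let summary_parts := if misses > 0 then
      summary_parts ++ ["Cache misses: " ++ PySem.Int.toStr misses] else summary_parts
    PySem.Str.join "  " summary_parts

-- ===== PORT B =====
-- the loop body of Source B: classify one dict and bump the matching counter
-- (the r["cache_bucket"] write is a mutation of the argument, invisible in the return value)
def pvStep (acc : Int × Int × Int) (r : List (String × String)) : Int × Int × Int :=
  let cs := pvGet r "cache_state"
  if cs == some "re-run-failed" then (acc.1, acc.2.1 + 1, acc.2.2)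
  else if cs == some "hit" then (acc.1 + 1, acc.2.1, acc.2.2)
  else (acc.1, acc.2.1, acc.2.2 + 1)

def format_cache_summary_alt (results : List (List (String × String))) : String :=
  let t := results.foldl pvStep (0, 0, 0)
  let hits := t.1
  let policy_reruns := t.2.1
  let misses := t.2.2
  let total := hits + policy_reruns + misses
  if total == 0 then "Cache: No cached operations"
  else
    let structural_hits := hits + policy_reruns
    let summary_parts : List String := []
    let summary_parts := if structural_hits > 0 then
      summary_parts ++ ["Cache (structural): " ++ PySem.Int.toStr structural_hits ++ "/" ++ PySem.Int.toStr total] else summary_parts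
    let summary_parts := if policy_reruns > 0 then
      summary_parts ++ ["Cache (policy-respected): " ++ PySem.Int.toStr policy_reruns ++ " re-run (failed tools)"] else summary_parts
    let summary_parts := if misses > 0 then
      summary_parts ++ ["Cache misses: " ++ PySem.Int.toStr misses] else summary_parts
    PySem.Str.join "  " summary_parts

-- ===== PRECONDITION & SPEC =====
def Spec_format_cache_summary (results : List (List (String × String))) (out : String) : Prop := out = format_cache_summary_alt results
instance (results : List (List (String × String))) (out : String) : Decidable (Spec_format_cache_summary results out) := by unfold Spec_format_cache_summary; infer_instance

-- ===== CLAIM (what is proved, stated in full; the proofs are below) =====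
def Claim_equal_format_cache_summary : Prop := ∀ (results : List (List (String × String))), Dom_format_cache_summary results → Spec_format_cache_summary results (format_cache_summary results)

-- ===== LEMMAS AND PROOFS =====

lemma pvGet_pvSet (r : List (String × String)) (k v : String) :
    pvGet (pvSet r k v) k = some v := by
  induction r with
  | nil => simp [pvGet, pvSet]
  | cons p rest ih =>
    by_cases h : p.1 = k
    · simp [pvGet, pvSet, h]
    · simp only [pvSet, beq_iff_eq, h, if_false]
      simpa [pvGet, h] using ih

lemma pvGet_norm (r : List (String × String)) :
    pvGet (normalize_cache_state r) "cache_bucket" =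
      some (if pvGet r "cache_state" == some "re-run-failed" then "hit-policy"
            else if pvGet r "cache_state" == some "hit" then "hit" else "miss") := by
  unfold normalize_cache_state
  split_ifs with h1 h2 <;> simp [pvGet_pvSet, *]

lemma foldl_pvStep (rs : List (List (String × String))) (a b c : Int) :
    rs.foldl pvStep (a, b, c) =
      (a + ((rs.map normalize_cache_state).filter (fun r => pvGet r "cache_bucket" == some "hit")).length,
       b + ((rs.map normalize_cache_state).filter (fun r => pvGet r "cache_bucket" == some "hit-policy")).length,
       c + ((rs.map normalize_cache_state).filter (fun r => pvGet r "cache_bucket" == some "miss")).length) := by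
  induction rs generalizing a b c with
  | nil => simp
  | cons r rs ih =>
    simp only [List.foldl_cons, List.map_cons, List.filter_cons, pvStep, pvGet_norm r]
    split_ifs with h1 h2 <;> rw [ih] <;> simp_all [Prod.ext_iff] <;> omega

-- ===== VERDICT (by name: the statement is the Claim_ definition above) =====
theorem format_cache_summary_spec : Claim_equal_format_cache_summary := by
  intro results _
  show format_cache_summary results = format_cache_summary_alt results
  unfold format_cache_summary format_cache_summary_alt
  rw [foldl_pvStep]
  simp
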